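-- pv_equiv track=rewrite | github.com/Mango5656/discord-mic-toggle | discord_mouse_rpc.py | _build_combo_string_from_list
-- ===== SOURCE A (Python) =====
-- def _build_combo_string_from_list(key_list):
--     """Build combo string from a list of keys, preserving order for non-modifiers"""
--     if not key_list:
--         return ""
--
--     # Priority: Ctrl, Alt, Shift, Win
--     priority = {'Ctrl': 0, 'Alt': 1, 'Shift': 2, 'Win': 3}
--
--     modifiers = []
--     others = []
--
--     # Separate modifiers and others
--     # We process the input list in order
--     for k in key_list:
--         if k in priority:
--             modifiers.append(k)
--         else:
--             others.append(k)
--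
--     # Sort modifiers by priority
--     modifiers.sort(key=lambda x: priority[x])
--
--     # Combine: Modifiers first, then others (in original press order)
--     final_list = modifiers + others
--
--     return '+'.join(final_list[:2])
-- ===== SOURCE B (Python) =====
-- def _build_combo_string_from_list(key_list):
--     """Build combo string: one stable sort puts modifiers (Ctrl<Alt<Shift<Win) first."""
--     priority = {'Ctrl': 0, 'Alt': 1, 'Shift': 2, 'Win': 3}
--     ordered = sorted(key_list, key=lambda k: priority.get(k, 4))
--     return '+'.join(ordered[:2])
-- ===== Notes on version B (the rewrite author's own statement) =====
-- stated objective: idiomatic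
-- what changed: Replaces the partition into modifier/other lists plus a separate sort of the modifier sublist with a single stable sort of the whole list keyed by priority.get(k, 4), so non-modifiers share key 4 and keep their press order by stability.
import Mathlib
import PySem

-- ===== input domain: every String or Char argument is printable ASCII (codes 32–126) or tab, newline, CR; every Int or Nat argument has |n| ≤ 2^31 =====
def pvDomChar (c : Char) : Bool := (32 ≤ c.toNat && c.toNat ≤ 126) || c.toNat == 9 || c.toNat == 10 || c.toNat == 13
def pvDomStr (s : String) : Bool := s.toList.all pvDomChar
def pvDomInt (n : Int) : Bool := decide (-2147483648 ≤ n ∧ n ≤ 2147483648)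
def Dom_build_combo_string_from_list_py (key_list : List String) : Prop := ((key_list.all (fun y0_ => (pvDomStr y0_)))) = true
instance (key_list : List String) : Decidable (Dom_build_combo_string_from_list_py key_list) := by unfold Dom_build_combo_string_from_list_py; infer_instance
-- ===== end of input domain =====

-- B replaces A's partition-into-two-lists + separate modifier sort by ONE stable sort of the
-- whole list keyed by priority.get(k, 4); same return value, proved equal below (objective: idiomatic).


-- ===== PORT A =====
-- literal port of A: early return on [], one loop partitioning into (modifiers, others),
-- modifiers sorted by priority[x], '+'.join of the first two of modifiers ++ others
def build_combo_string_from_list_py (key_list : List String) : String :=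
  if key_list = [] then ""
  else
    let priority : PySem.Dict String Int :=
      ((((PySem.Dict.empty.insert "Ctrl" 0).insert "Alt" 1).insert "Shift" 2).insert "Win" 3)
    let mo := key_list.foldl
      (fun (acc : List String × List String) k =>
        if priority.contains k then (acc.1 ++ [k], acc.2) else (acc.1, acc.2 ++ [k]))
      ([], [])
    -- modifiers.sort(key=lambda x: priority[x]); every element of mo.1 is a key of priority,
    -- so the lookup priority[x] equals priority.getD x 0 on the loop's output (exact there)
    let modifiers := PySem.List.sorted mo.1 (fun x => priority.getD x 0) false
    let final_list := modifiers ++ mo.2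
    PySem.Str.join "+" (PySem.List.slice final_list none (some 2))

-- ===== PORT B =====
-- port of Source B: one stable sort of the whole list, key = priority.get(k, 4), join first two
def build_combo_string_from_list_py_alt (key_list : List String) : String :=
  let priority : PySem.Dict String Int :=
    ((((PySem.Dict.empty.insert "Ctrl" 0).insert "Alt" 1).insert "Shift" 2).insert "Win" 3)
  let ordered := PySem.List.sorted key_list (fun k => priority.getD k 4) false
  PySem.Str.join "+" (PySem.List.slice ordered none (some 2))

-- ===== PRECONDITION & SPEC =====
def Spec_build_combo_string_from_list_py (key_list : List String) (out : String) : Prop := out = build_combo_string_from_list_py_alt key_list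
instance (key_list : List String) (out : String) : Decidable (Spec_build_combo_string_from_list_py key_list out) := by unfold Spec_build_combo_string_from_list_py; infer_instance

-- ===== CLAIM (what is proved, stated in full; the proofs are below) =====
def Claim_equal_build_combo_string_from_list_py : Prop := ∀ (key_list : List String), Dom_build_combo_string_from_list_py key_list → Spec_build_combo_string_from_list_py key_list (build_combo_string_from_list_py key_list)

-- ===== LEMMAS AND PROOFS =====

-- the priority dict, abbreviated for the proofs (the ports spell it out as a let)
def pvD : PySem.Dict String Int :=
  ((((PySem.Dict.empty.insert "Ctrl" 0).insert "Alt" 1).insert "Shift" 2).insert "Win" 3)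

theorem beq_sym_false {a b : String} (h : ¬ a = b) : (b == a) = false :=
  beq_eq_false_iff_ne.mpr (Ne.symm h)

theorem pvD_items : pvD = ⟨[("Ctrl", 0), ("Alt", 1), ("Shift", 2), ("Win", 3)]⟩ := by rfl

theorem pvD_getD (k : String) (d : Int) :
    pvD.getD k d =
      if k = "Ctrl" then 0 else if k = "Alt" then 1 else if k = "Shift" then 2
      else if k = "Win" then 3 else d := by
  by_cases h1 : k = "Ctrl"
  · subst h1; rfl
  by_cases h2 : k = "Alt"
  · subst h2; rfl
  by_cases h3 : k = "Shift"
  · subst h3; rfl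
  by_cases h4 : k = "Win"
  · subst h4; rfl
  simp [pvD_items, PySem.Dict.getD, PySem.Dict.get?, List.find?,
    beq_sym_false h1, beq_sym_false h2, beq_sym_false h3, beq_sym_false h4, h1, h2, h3, h4]

theorem pvD_contains (k : String) :
    pvD.contains k = (k == "Ctrl" || k == "Alt" || k == "Shift" || k == "Win") := by
  by_cases h1 : k = "Ctrl"
  · subst h1; rfl
  by_cases h2 : k = "Alt"
  · subst h2; rfl
  by_cases h3 : k = "Shift"
  · subst h3; rfl
  by_cases h4 : k = "Win"
  · subst h4; rfl
  simp [pvD_items, PySem.Dict.contains,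
    beq_sym_false h1, beq_sym_false h2, beq_sym_false h3, beq_sym_false h4,
    beq_eq_false_iff_ne.mpr h1, beq_eq_false_iff_ne.mpr h2,
    beq_eq_false_iff_ne.mpr h3, beq_eq_false_iff_ne.mpr h4]

-- A's partition loop computes the two filters
theorem partition_fold (p : String → Bool) (xs : List String) (as bs : List String) :
    xs.foldl (fun (acc : List String × List String) k =>
        if p k then (acc.1 ++ [k], acc.2) else (acc.1, acc.2 ++ [k])) (as, bs)
      = (as ++ xs.filter p, bs ++ xs.filter (fun k => !p k)) := by
  induction xs generalizing as bs with
  | nil => simp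
  | cons x t ih =>
    by_cases hx : p x <;> simp [hx, ih]

theorem insertBy_skip (before : String → String → Bool) (x : String) (as bs : List String)
    (h : ∀ a ∈ as, before x a = false) :
    PySem.List.insertBy before x (as ++ bs) = as ++ PySem.List.insertBy before x bs := by
  induction as with
  | nil => simp
  | cons a t ih =>
    simp only [List.cons_append, PySem.List.insertBy, h a (by simp)]
    simp only [Bool.false_eq_true, if_false, List.cons.injEq, true_and]
    exact ih (fun a' ha' => h a' (by simp [ha']))

theorem insertBy_front (before : String → String → Bool) (x : String) (bs : List String)
    (h : ∀ b ∈ bs, before x b = true) :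
    PySem.List.insertBy before x bs = x :: bs := by
  cases bs with
  | nil => simp [PySem.List.insertBy]
  | cons b t => simp [PySem.List.insertBy, h b (by simp)]

theorem insertBy_into (before : String → String → Bool) (x : String) (as bs : List String)
    (has : ∀ a ∈ as, before x a = false) (hbs : ∀ b ∈ bs, before x b = true) :
    PySem.List.insertBy before x (as ++ bs) = as ++ x :: bs := by
  rw [insertBy_skip before x as bs has, insertBy_front before x bs hbs]

theorem mem_filter_key (f : String → Int) (j : Int) (a : String) (xs : List String)
    (h : a ∈ xs.filter (fun k => f k == j)) : f a = j := by
  simpa using (List.mem_filter.mp h).2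

-- stable sort with keys in {0,…,4} = concatenation of the five equal-key groups in input order
theorem sorted_blocks (f : String → Int) (hf : ∀ s : String, 0 ≤ f s ∧ f s ≤ 4)
    (xs : List String) :
    PySem.List.sorted xs f false =
      xs.filter (fun k => f k == 0) ++ xs.filter (fun k => f k == 1) ++
      xs.filter (fun k => f k == 2) ++ xs.filter (fun k => f k == 3) ++
      xs.filter (fun k => f k == 4) := by
  rw [PySem.List.sorted_eq_foldl_insertBy]
  induction xs using List.reverseRecOn with
  | nil => simp
  | append_singleton ys x ih =>
    rw [List.foldl_append, List.foldl_cons, List.foldl_nil, ih]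
    have hx := hf x
    have h5 : f x = 0 ∨ f x = 1 ∨ f x = 2 ∨ f x = 3 ∨ f x = 4 := by omega
    set bef := fun a b => decide (f a < f b) with hbef
    have bfalse : ∀ a : String, f a ≤ f x → bef x a = false := by
      intro a haa; simp only [hbef, decide_eq_false_iff_not, not_lt]; exact haa
    have btrue : ∀ b : String, f x < f b → bef x b = true := by
      intro b hbb; simp only [hbef, decide_eq_true_eq]; exact hbb
    have k0 := fun a ha => mem_filter_key f 0 a ys ha
    have k1 := fun a ha => mem_filter_key f 1 a ys ha
    have k2 := fun a ha => mem_filter_key f 2 a ys ha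
    have k3 := fun a ha => mem_filter_key f 3 a ys ha
    have k4 := fun a ha => mem_filter_key f 4 a ys ha
    rcases h5 with h | h | h | h | h
    all_goals simp only [List.filter_append, List.filter_cons, List.filter_nil, h]
    all_goals norm_num
    all_goals set F0 : List String := ys.filter (fun k => f k == 0) with hF0
    all_goals set F1 : List String := ys.filter (fun k => f k == 1) with hF1
    all_goals set F2 : List String := ys.filter (fun k => f k == 2) with hF2
    all_goals set F3 : List String := ys.filter (fun k => f k == 3) with hF3
    all_goals set F4 : List String := ys.filter (fun k => f k == 4) with hF4
    · -- f x = 0: x goes right after the 0-block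
      exact insertBy_into bef x F0 (F1 ++ (F2 ++ (F3 ++ F4)))
        (fun a ha => bfalse a (by have := k0 a ha; omega))
        (fun b hb => btrue b (by
          simp only [List.mem_append] at hb
          rcases hb with hb | hb | hb | hb <;>
            [have := k1 b hb; have := k2 b hb; have := k3 b hb; have := k4 b hb] <;> omega))
    · -- f x = 1
      rw [← List.append_assoc F0 F1 (F2 ++ (F3 ++ F4))]
      rw [insertBy_into bef x (F0 ++ F1) (F2 ++ (F3 ++ F4))
        (fun a ha => bfalse a (by
          simp only [List.mem_append] at ha
          rcases ha with ha | ha <;> [have := k0 a ha; have := k1 a ha] <;> omega))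
        (fun b hb => btrue b (by
          simp only [List.mem_append] at hb
          rcases hb with hb | hb | hb <;>
            [have := k2 b hb; have := k3 b hb; have := k4 b hb] <;> omega))]
      simp [List.append_assoc]
    · -- f x = 2
      rw [← List.append_assoc F1 F2 (F3 ++ F4)]
      rw [← List.append_assoc F0 (F1 ++ F2) (F3 ++ F4)]
      rw [insertBy_into bef x (F0 ++ (F1 ++ F2)) (F3 ++ F4)
        (fun a ha => bfalse a (by
          simp only [List.mem_append] at ha
          rcases ha with ha | ha | ha <;>
            [have := k0 a ha; have := k1 a ha; have := k2 a ha] <;> omega))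
        (fun b hb => btrue b (by
          simp only [List.mem_append] at hb
          rcases hb with hb | hb <;> [have := k3 b hb; have := k4 b hb] <;> omega))]
      simp [List.append_assoc]
    · -- f x = 3
      rw [← List.append_assoc F2 F3 F4]
      rw [← List.append_assoc F1 (F2 ++ F3) F4]
      rw [← List.append_assoc F0 (F1 ++ (F2 ++ F3)) F4]
      rw [insertBy_into bef x (F0 ++ (F1 ++ (F2 ++ F3))) F4
        (fun a ha => bfalse a (by
          simp only [List.mem_append] at ha
          rcases ha with ha | ha | ha | ha <;>
            [have := k0 a ha; have := k1 a ha; have := k2 a ha; have := k3 a ha] <;> omega))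
        (fun b hb => btrue b (by have := k4 b hb; omega))]
      simp [List.append_assoc]
    · -- f x = 4: x goes last
      rw [PySem.List.insertBy_of_forall_not_before bef x (F0 ++ (F1 ++ (F2 ++ (F3 ++ F4))))
        (fun a ha => bfalse a (by
          simp only [List.mem_append] at ha
          rcases ha with ha | ha | ha | ha | ha <;>
            [have := k0 a ha; have := k1 a ha; have := k2 a ha; have := k3 a ha;
             have := k4 a ha] <;> omega))]
      simp [List.append_assoc]

theorem hfA : ∀ s : String, 0 ≤ pvD.getD s 0 ∧ pvD.getD s 0 ≤ 4 := by
  intro s; rw [pvD_getD]; split_ifs <;> omega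

theorem hfB : ∀ s : String, 0 ≤ pvD.getD s 4 ∧ pvD.getD s 4 ≤ 4 := by
  intro s; rw [pvD_getD]; split_ifs <;> omega

theorem blk_eq (j : Int) (hj : j ≠ 4) (k : String) :
    ((pvD.getD k 0 == j) && pvD.contains k) = (pvD.getD k 4 == j) := by
  rw [pvD_getD, pvD_getD, pvD_contains]
  by_cases h1 : k = "Ctrl" <;> by_cases h2 : k = "Alt" <;> by_cases h3 : k = "Shift" <;>
    by_cases h4 : k = "Win" <;>
    simp_all [beq_iff_eq, beq_eq_false_iff_ne.mpr (Ne.symm hj)]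

theorem blk4 (k : String) : ((pvD.getD k 0 == 4) && pvD.contains k) = false := by
  rw [pvD_getD, pvD_contains]
  by_cases h1 : k = "Ctrl" <;> by_cases h2 : k = "Alt" <;> by_cases h3 : k = "Shift" <;>
    by_cases h4 : k = "Win" <;> simp_all

theorem others_eq (k : String) : (!pvD.contains k) = (pvD.getD k 4 == 4) := by
  rw [pvD_getD, pvD_contains]
  by_cases h1 : k = "Ctrl" <;> by_cases h2 : k = "Alt" <;> by_cases h3 : k = "Shift" <;>
    by_cases h4 : k = "Win" <;> simp_all

-- the two final lists coincide
theorem lists_eq (xs : List String) :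
    PySem.List.sorted (xs.filter (fun k => pvD.contains k)) (fun x => pvD.getD x 0) false
      ++ xs.filter (fun k => !pvD.contains k)
    = PySem.List.sorted xs (fun k => pvD.getD k 4) false := by
  rw [sorted_blocks _ hfA, sorted_blocks _ hfB]
  rw [List.filter_filter, List.filter_filter, List.filter_filter, List.filter_filter,
    List.filter_filter]
  rw [List.filter_congr (fun k _ => blk_eq 0 (by norm_num) k),
    List.filter_congr (fun k _ => blk_eq 1 (by norm_num) k),
    List.filter_congr (fun k _ => blk_eq 2 (by norm_num) k),
    List.filter_congr (fun k _ => blk_eq 3 (by norm_num) k),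
    List.filter_congr (fun k _ => blk4 k),
    List.filter_congr (fun k _ => others_eq k)]
  simp [List.append_assoc]

-- the whole non-empty branch, phrased over pvD (definitionally the ports' let-bound dict)
theorem core (key_list : List String) :
    PySem.Str.join "+" (PySem.List.slice
      (PySem.List.sorted
          (key_list.foldl (fun (acc : List String × List String) k =>
              if pvD.contains k then (acc.1 ++ [k], acc.2) else (acc.1, acc.2 ++ [k]))
            ([], [])).1
          (fun x => pvD.getD x 0) false ++
        (key_list.foldl (fun (acc : List String × List String) k =>
              if pvD.contains k then (acc.1 ++ [k], acc.2) else (acc.1, acc.2 ++ [k]))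
            ([], [])).2)
      none (some 2)) =
    PySem.Str.join "+" (PySem.List.slice
      (PySem.List.sorted key_list (fun k => pvD.getD k 4) false) none (some 2)) := by
  rw [partition_fold (fun k => pvD.contains k) key_list [] []]
  simp only [List.nil_append]
  rw [lists_eq key_list]

-- ===== VERDICT (by name: the statement is the Claim_ definition above) =====
theorem build_combo_string_from_list_py_spec : Claim_equal_build_combo_string_from_list_py := by
  intro key_list _
  unfold Spec_build_combo_string_from_list_py build_combo_string_from_list_py
    build_combo_string_from_list_py_alt
  by_cases hN : key_list = []
  · subst hN; rfl
  · simp only [if_neg hN]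
    exact core key_list
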